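-- pv_equiv track=rewrite | github.com/Nosferatu172/scr-alias-system | zpy/foldermerger/combine4car.py | extract_source_tokens
-- ===== SOURCE A (Python) =====
-- def extract_source_tokens(argv: list[str]) -> tuple[list[str], list[str]]:
--     cleaned = []
--     source_tokens = []
--
--     i = 0
--     while i < len(argv):
--         a = argv[i]
--         if a in ("-s", "--source"):
--             i += 1
--             while i < len(argv):
--                 nxt = argv[i]
--                 if nxt.startswith("-"):
--                     break
--                 source_tokens.append(nxt)
--                 i += 1
--             continue
--
--         cleaned.append(a)
--         i += 1
--
--     return cleaned, source_tokens
-- ===== SOURCE B (Python) =====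
-- def extract_source_tokens(argv: list[str]) -> tuple[list[str], list[str]]:
--     cleaned = []
--     source_tokens = []
--     collecting = False
--     for tok in argv:
--         if tok in ("-s", "--source"):
--             collecting = True
--         elif collecting and not tok.startswith("-"):
--             source_tokens.append(tok)
--         else:
--             collecting = False
--             cleaned.append(tok)
--     return cleaned, source_tokens
-- ===== Notes on version B (the rewrite author's own statement) =====
-- stated objective: simpler
-- what changed: Replaced A's nested index-based while loops (inner consume-until-dash loop with break/continue) by a single flat for-loop over argv carrying a boolean collecting flag.
import Mathlib
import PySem

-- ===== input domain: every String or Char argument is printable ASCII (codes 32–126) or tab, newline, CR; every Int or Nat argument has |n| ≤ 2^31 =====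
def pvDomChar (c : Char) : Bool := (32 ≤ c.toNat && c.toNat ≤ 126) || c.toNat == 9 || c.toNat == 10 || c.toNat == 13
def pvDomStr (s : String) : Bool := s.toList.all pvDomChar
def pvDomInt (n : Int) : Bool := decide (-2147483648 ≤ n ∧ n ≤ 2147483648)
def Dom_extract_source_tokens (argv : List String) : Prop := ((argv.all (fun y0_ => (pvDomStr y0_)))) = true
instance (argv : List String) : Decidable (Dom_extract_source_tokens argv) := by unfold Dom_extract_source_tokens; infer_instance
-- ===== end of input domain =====

-- B replaces A's nested index-based while loops by one flat pass carrying a `collecting` flag (objective: simpler).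

-- ===== PORT A =====
-- inner `while` loop: consume non-dash tokens after -s/--source into src; returns (src, remaining argv)
def pvAInner (src : List String) : List String → List String × List String
  | [] => (src, [])
  | nxt :: t =>
    if PySem.Str.startswith nxt "-" then (src, nxt :: t)
    else pvAInner (src ++ [nxt]) t

theorem pvAInner_len (src : List String) (t : List String) :
    (pvAInner src t).2.length ≤ t.length := by
  induction t generalizing src with
  | nil => simp [pvAInner]
  | cons nxt t ih =>
    simp only [pvAInner]
    split
    · simp
    · exact Nat.le_trans (ih _) (Nat.le_succ _)

-- outer `while` loop over argv, with accumulators cleaned / src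
def pvAOuter (cleaned src : List String) : List String → List String × List String
  | [] => (cleaned, src)
  | a :: t =>
    if a = "-s" ∨ a = "--source" then
      let p := pvAInner src t
      pvAOuter cleaned p.1 p.2
    else
      pvAOuter (cleaned ++ [a]) src t
termination_by rest => rest.length
decreasing_by
  · exact Nat.lt_succ_of_le (pvAInner_len src t)
  · simp

def extract_source_tokens (argv : List String) : List String × List String :=
  pvAOuter [] [] argv

-- ===== PORT B =====
-- one step of B's flat for-loop; state = (collecting, cleaned, source_tokens)
def pvBStep (st : Bool × List String × List String) (tok : String) :
    Bool × List String × List String :=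
  if tok = "-s" ∨ tok = "--source" then (true, st.2.1, st.2.2)
  else if st.1 && !(PySem.Str.startswith tok "-") then (true, st.2.1, st.2.2 ++ [tok])
  else (false, st.2.1 ++ [tok], st.2.2)

def extract_source_tokens_alt (argv : List String) : List String × List String :=
  let st := argv.foldl pvBStep (false, [], [])
  (st.2.1, st.2.2)

-- ===== PRECONDITION & SPEC =====
def Spec_extract_source_tokens (argv : List String) (out : List String × List String) : Prop := out = extract_source_tokens_alt argv
instance (argv : List String) (out : List String × List String) : Decidable (Spec_extract_source_tokens argv out) := by unfold Spec_extract_source_tokens; infer_instance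

-- ===== CLAIM (what is proved, stated in full; the proofs are below) =====
def Claim_equal_extract_source_tokens : Prop := ∀ (argv : List String), Dom_extract_source_tokens argv → Spec_extract_source_tokens argv (extract_source_tokens argv)

-- ===== LEMMAS AND PROOFS =====

def pvFinish (st : Bool × List String × List String) : List String × List String :=
  (st.2.1, st.2.2)

theorem pvAOuter_nil (cleaned src : List String) : pvAOuter cleaned src [] = (cleaned, src) := by
  simp [pvAOuter]

theorem pvAOuter_cons (cleaned src : List String) (a : String) (t : List String) :
    pvAOuter cleaned src (a :: t) =
      if a = "-s" ∨ a = "--source" then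
        pvAOuter cleaned (pvAInner src t).1 (pvAInner src t).2
      else pvAOuter (cleaned ++ [a]) src t := by
  rw [pvAOuter]

theorem pv_flag_startswith {a : String} (hf : a = "-s" ∨ a = "--source") :
    PySem.Chars.startswith a.toList ['-'] = true := by
  rcases hf with rfl | rfl <;> decide

theorem pv_main (t : List String) :
    (∀ src cleaned,
      pvAOuter cleaned (pvAInner src t).1 (pvAInner src t).2
        = pvFinish (t.foldl pvBStep (true, cleaned, src))) ∧
    (∀ cleaned src,
      pvAOuter cleaned src t = pvFinish (t.foldl pvBStep (false, cleaned, src))) := by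
  induction t with
  | nil =>
    exact ⟨fun src cleaned => by simp [pvAInner, pvAOuter_nil, pvFinish],
           fun cleaned src => by simp [pvAOuter_nil, pvFinish]⟩
  | cons a t ih =>
    constructor
    · intro src cleaned
      by_cases hd : PySem.Chars.startswith a.toList ['-'] = true
      · -- inner loop breaks on the dash token; the outer loop re-examines it
        rw [show pvAInner src (a :: t) = (src, a :: t) by simp [pvAInner, hd]]
        by_cases hf : a = "-s" ∨ a = "--source"
        · rw [pvAOuter_cons, if_pos hf, List.foldl_cons,
            show pvBStep (true, cleaned, src) a = (true, cleaned, src) by simp [pvBStep, hf]]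
          exact ih.1 src cleaned
        · rw [pvAOuter_cons, if_neg hf, List.foldl_cons,
            show pvBStep (true, cleaned, src) a = (false, cleaned ++ [a], src) by
              simp [pvBStep, hf, hd]]
          exact ih.2 (cleaned ++ [a]) src
      · -- inner loop consumes the token
        have hf : ¬ (a = "-s" ∨ a = "--source") := fun hf => hd (pv_flag_startswith hf)
        rw [show pvAInner src (a :: t) = pvAInner (src ++ [a]) t by
              simp [pvAInner, hd],
          List.foldl_cons,
          show pvBStep (true, cleaned, src) a = (true, cleaned, src ++ [a]) by
            simp [pvBStep, hf, hd]]
        exact ih.1 (src ++ [a]) cleaned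
    · intro cleaned src
      by_cases hf : a = "-s" ∨ a = "--source"
      · rw [pvAOuter_cons, if_pos hf, List.foldl_cons,
          show pvBStep (false, cleaned, src) a = (true, cleaned, src) by simp [pvBStep, hf]]
        exact ih.1 src cleaned
      · rw [pvAOuter_cons, if_neg hf, List.foldl_cons,
          show pvBStep (false, cleaned, src) a = (false, cleaned ++ [a], src) by
            simp [pvBStep, hf]]
        exact ih.2 (cleaned ++ [a]) src

-- ===== VERDICT (by name: the statement is the Claim_ definition above) =====
theorem extract_source_tokens_spec : Claim_equal_extract_source_tokens := by
  intro argv _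
  unfold Spec_extract_source_tokens extract_source_tokens extract_source_tokens_alt
  exact (pv_main argv).2 [] []
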